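-- pv_equiv track=rewrite | github.com/TechdudeGames/AutoGames | AutoWar/AutoWarCLI.py | totalup
-- ===== SOURCE A (Python) =====
-- def totalup(statlist):
-- 	'''
-- 	:param statlist: The current real time statistic list
-- 	:return: A list of totaled data from this rt list
-- 	'''
-- 	outputstlist = []
-- 	for i in range(0, 4):
-- 		outputstlist.append(0)  # Putting in values that way we can add to them
-- 	for dive in statlist:
-- 		for subdive in range(0, 4):
-- 			outputstlist[subdive] += dive[subdive]
-- 	return outputstlist
-- ===== SOURCE B (Python) =====
-- def totalup(statlist):
--     # Divide and conquer: total each half recursively, then add the two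
--     # 4-vectors componentwise (correct because addition is associative).
--     if len(statlist) == 0:
--         return [0, 0, 0, 0]
--     if len(statlist) == 1:
--         row = statlist[0]
--         return [row[0], row[1], row[2], row[3]]
--     mid = len(statlist) // 2
--     left = totalup(statlist[:mid])
--     right = totalup(statlist[mid:])
--     return [left[i] + right[i] for i in range(4)]
-- ===== Notes on version B (the rewrite author's own statement) =====
-- stated objective: alternative
-- what changed: Replaces the single-pass nested-loop accumulator with a recursive divide-and-conquer: split the row list in half, total each half recursively, and add the two 4-vectors componentwise.
import Mathlib
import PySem

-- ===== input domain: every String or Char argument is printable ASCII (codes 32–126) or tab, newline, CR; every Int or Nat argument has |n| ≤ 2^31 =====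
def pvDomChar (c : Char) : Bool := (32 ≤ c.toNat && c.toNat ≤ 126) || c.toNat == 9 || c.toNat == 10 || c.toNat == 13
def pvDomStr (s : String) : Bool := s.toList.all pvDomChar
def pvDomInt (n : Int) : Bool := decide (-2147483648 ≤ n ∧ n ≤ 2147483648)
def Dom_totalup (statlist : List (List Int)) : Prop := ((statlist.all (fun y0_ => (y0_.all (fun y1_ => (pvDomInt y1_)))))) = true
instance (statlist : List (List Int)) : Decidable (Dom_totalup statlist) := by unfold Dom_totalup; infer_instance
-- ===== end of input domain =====

-- B replaces A's nested-loop accumulator with a recursive divide-and-conquer (alternative decomposition, same cost).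

-- ===== PORT A =====
-- A mutates outputstlist in place; ported as a fold carrying the 4-slot list.
-- dive[subdive] is ported with getD 0; Pre_totalup keeps every index in range.
def totalup (statlist : List (List Int)) : List Int :=
  statlist.foldl
    (fun acc dive =>
      (List.range 4).foldl (fun a i => a.set i (a.getD i 0 + dive.getD i 0)) acc)
    ((List.range 4).foldl (fun a _ => a ++ [0]) [])

-- ===== PORT B =====
-- row[i] / left[i] / right[i] are in range on every input Pre_totalup admits; ported with getD 0.
def totalup_alt (statlist : List (List Int)) : List Int :=
  if statlist.length = 0 then [0, 0, 0, 0]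
  else if statlist.length = 1 then
    let row := statlist.getD 0 []
    [row.getD 0 0, row.getD 1 0, row.getD 2 0, row.getD 3 0]
  else
    let mid := statlist.length / 2
    let left := totalup_alt (statlist.take mid)
    let right := totalup_alt (statlist.drop mid)
    (List.range 4).map (fun i => left.getD i 0 + right.getD i 0)
termination_by statlist.length
decreasing_by
  · simp only [List.length_take]; omega
  · simp only [List.length_drop]; omega

-- ===== PRECONDITION & SPEC =====
-- Pre_ excludes exactly the inputs where Python A raises IndexError (a row shorter than 4).
def Pre_totalup (statlist : List (List Int)) : Prop :=
  ∀ row ∈ statlist, 4 ≤ row.length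
instance (statlist : List (List Int)) : Decidable (Pre_totalup statlist) := by
  unfold Pre_totalup; infer_instance
def pvWitness_totalup : List (List Int) := ([[1, 2, 3, 4], [5, 6, 7, 8]])
def Spec_totalup (statlist : List (List Int)) (out : List Int) : Prop := out = totalup_alt statlist
instance (statlist : List (List Int)) (out : List Int) : Decidable (Spec_totalup statlist out) := by unfold Spec_totalup; infer_instance

-- ===== CLAIM (what is proved, stated in full; the proofs are below) =====
def Claim_equal_totalup : Prop := ∀ (statlist : List (List Int)), Dom_totalup statlist → Pre_totalup statlist → Spec_totalup statlist (totalup statlist)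

-- ===== LEMMAS AND PROOFS =====
-- the i-th column sum, the common value both ports compute
def colS (i : Nat) (l : List (List Int)) : Int := (l.map (fun r => r.getD i 0)).sum

lemma colS_append (i : Nat) (l₁ l₂ : List (List Int)) :
    colS i (l₁ ++ l₂) = colS i l₁ + colS i l₂ := by
  simp [colS]

-- one pass of A's inner subdive loop on a 4-slot accumulator
lemma inner_step (dive : List Int) (a0 a1 a2 a3 : Int) :
    (List.range 4).foldl (fun a i => a.set i (a.getD i 0 + dive.getD i 0)) [a0, a1, a2, a3]
    = [a0 + dive.getD 0 0, a1 + dive.getD 1 0, a2 + dive.getD 2 0, a3 + dive.getD 3 0] := by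
  rw [show (List.range 4) = [0, 1, 2, 3] by decide]
  simp [List.getD]

-- A's fold over statlist adds the column sums onto any 4-slot accumulator
lemma totalup_fold (l : List (List Int)) (a0 a1 a2 a3 : Int) :
    l.foldl
      (fun acc dive =>
        (List.range 4).foldl (fun a i => a.set i (a.getD i 0 + dive.getD i 0)) acc)
      [a0, a1, a2, a3]
    = [a0 + colS 0 l, a1 + colS 1 l, a2 + colS 2 l, a3 + colS 3 l] := by
  induction l generalizing a0 a1 a2 a3 with
  | nil => simp [colS]
  | cons r t ih =>
      rw [List.foldl_cons, inner_step, ih]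
      simp only [colS, List.map_cons, List.sum_cons]
      refine congrArg₂ _ (by ring) (congrArg₂ _ (by ring) (congrArg₂ _ (by ring)
        (congrArg₂ _ (by ring) rfl)))

-- B computes the same four column sums
lemma alt_eq (l : List (List Int)) :
    totalup_alt l = [colS 0 l, colS 1 l, colS 2 l, colS 3 l] := by
  fun_induction totalup_alt l with
  | case1 l h =>
      match l, h with
      | [], _ => simp [colS]
  | case2 l h h1 =>
      obtain ⟨r, hr⟩ := List.length_eq_one_iff.mp h1
      subst hr
      show [r.getD 0 0, r.getD 1 0, r.getD 2 0, r.getD 3 0]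
        = [colS 0 [r], colS 1 [r], colS 2 [r], colS 3 [r]]
      simp [colS]
  | case3 l h h1 mid left right ih1 ih2 =>
      have hl : left = [colS 0 (List.take mid l), colS 1 (List.take mid l),
          colS 2 (List.take mid l), colS 3 (List.take mid l)] := ih1
      have hr : right = [colS 0 (List.drop mid l), colS 1 (List.drop mid l),
          colS 2 (List.drop mid l), colS 3 (List.drop mid l)] := ih2
      rw [hl, hr]
      rw [show (List.range 4) = [0, 1, 2, 3] by decide]
      simp only [List.map_cons, List.map_nil, List.getD]
      have := fun i => (colS_append i (l.take mid) (l.drop mid))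
      simp only [List.take_append_drop] at this
      simp [← this]

-- ===== VERDICT (by name: the statement is the Claim_ definition above) =====
theorem totalup_spec : Claim_equal_totalup := by
  intro statlist _ _
  unfold Spec_totalup totalup
  rw [alt_eq]
  rw [show ((List.range 4).foldl (fun a _ => a ++ [0]) [] : List Int) = [0, 0, 0, 0] by decide]
  rw [totalup_fold]
  simp
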